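-- pv_equiv track=rewrite | github.com/Lukas-Maynard/DataMining | cs455_homework2_Maynard_program copy.py | computeDistanceNominal
-- ===== SOURCE A (Python) =====
-- def computeDistanceNominal(data):
--     distanceMatrix = []
--     for i in range(len(data)):
--         temp = []
--         for j in range(len(data)):
--             if (data[i] != data[j]):
--                 difference = 1
--             else:
--                 difference = 0
--             temp.append(difference)
--         distanceMatrix.append(temp)
--     return distanceMatrix
-- ===== SOURCE B (Python) =====
-- def computeDistanceNominal(data):
--     # Compute each distinct value's distance row once, cache it, and reuse it
--     # for duplicates (equal values have identical rows).
--     cache = {}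
--     matrix = []
--     for x in data:
--         row = cache.get(x)
--         if row is None:
--             row = [1 if x != y else 0 for y in data]
--             cache[x] = row
--         matrix.append(row)
--     return matrix
-- ===== Notes on version B (the rewrite author's own statement) =====
-- stated objective: alternative
-- what changed: B replaces the index-based double loop with a single pass over the elements that computes one distance row per DISTINCT value, caches it in a dict, and reuses the cached row for every duplicate occurrence.
import Mathlib
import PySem

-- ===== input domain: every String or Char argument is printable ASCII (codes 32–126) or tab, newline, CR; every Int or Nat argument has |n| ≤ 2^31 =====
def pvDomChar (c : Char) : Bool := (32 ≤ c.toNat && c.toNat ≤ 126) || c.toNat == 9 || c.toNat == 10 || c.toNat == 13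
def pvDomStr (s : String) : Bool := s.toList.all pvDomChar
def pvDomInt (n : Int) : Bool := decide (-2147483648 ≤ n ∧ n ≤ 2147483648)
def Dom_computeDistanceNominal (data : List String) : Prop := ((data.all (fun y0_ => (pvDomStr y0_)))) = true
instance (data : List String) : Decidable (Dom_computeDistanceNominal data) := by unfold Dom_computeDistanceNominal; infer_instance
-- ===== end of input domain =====

-- B computes one distance row per distinct value, cached in a dict and reused for duplicates (alternative decomposition).


-- ===== PORT A =====
-- for i in range(len(data)): for j in range(len(data)): append 1/0; data[i] etc. via pyGetD
-- (indices are always in range, so the default of pyGetD is never used)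
def computeDistanceNominal (data : List String) : List (List Int) :=
  (PySem.List.pyRange 0 (data.length : Int) 1).foldl (fun dm i =>
    dm ++ [(PySem.List.pyRange 0 (data.length : Int) 1).foldl (fun temp j =>
      temp ++ [if PySem.List.pyGetD data i "" ≠ PySem.List.pyGetD data j "" then (1 : Int) else 0]) []]) []

-- ===== PORT B =====
-- row = [1 if x != y else 0 for y in data]
def pvRowB (x : String) (data : List String) : List Int :=
  data.foldl (fun r y => r ++ [if x ≠ y then (1 : Int) else 0]) []

-- one pass over data, caching the row per distinct value in a dict
def computeDistanceNominal_alt (data : List String) : List (List Int) :=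
  (data.foldl (fun (st : PySem.Dict String (List Int) × List (List Int)) x =>
      match st.1.get? x with
      | some row => (st.1, st.2 ++ [row])
      | none =>
          let row := pvRowB x data
          (st.1.insert x row, st.2 ++ [row]))
    (PySem.Dict.empty, [])).2

-- ===== PRECONDITION & SPEC =====
def Spec_computeDistanceNominal (data : List String) (out : List (List Int)) : Prop := out = computeDistanceNominal_alt data
instance (data : List String) (out : List (List Int)) : Decidable (Spec_computeDistanceNominal data out) := by unfold Spec_computeDistanceNominal; infer_instance

-- ===== CLAIM (what is proved, stated in full; the proofs are below) =====
def Claim_equal_computeDistanceNominal : Prop := ∀ (data : List String), Dom_computeDistanceNominal data → Spec_computeDistanceNominal data (computeDistanceNominal data)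

-- ===== LEMMAS AND PROOFS =====

-- A is the map of rows
theorem computeDistanceNominal_eq_map (data : List String) :
    computeDistanceNominal data = data.map (fun x => pvRowB x data) := by
  unfold computeDistanceNominal
  rw [PySem.List.foldl_pyRange_zero_pyGetD' data ""
      (fun dm v => dm ++ [(PySem.List.pyRange 0 (data.length : Int) 1).foldl (fun temp j =>
        temp ++ [if v ≠ PySem.List.pyGetD data j "" then (1 : Int) else 0]) []]) []]
  rw [PySem.List.foldl_append_singleton_eq_map]
  refine List.map_congr_left (fun x _ => ?_)
  rw [PySem.List.foldl_pyRange_zero_pyGetD' data ""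
      (fun temp w => temp ++ [if x ≠ w then (1 : Int) else 0]) []]
  rfl

-- B's loop with the cache invariant
theorem pvB_loop (data : List String) (rest : List String)
    (d : PySem.Dict String (List Int)) (out : List (List Int))
    (hinv : ∀ x row, d.get? x = some row → row = pvRowB x data) :
    (rest.foldl (fun (st : PySem.Dict String (List Int) × List (List Int)) x =>
        match st.1.get? x with
        | some row => (st.1, st.2 ++ [row])
        | none =>
            let row := pvRowB x data
            (st.1.insert x row, st.2 ++ [row])) (d, out)).2
      = out ++ rest.map (fun x => pvRowB x data) := by
  induction rest generalizing d out with
  | nil => simp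
  | cons x t ih =>
    simp only [List.foldl_cons, List.map_cons]
    cases hget : d.get? x with
    | some row =>
      rw [ih d (out ++ [row]) hinv, hinv x row hget]
      simp
    | none =>
      rw [ih (d.insert x (pvRowB x data)) (out ++ [pvRowB x data]) ?_]
      · simp
      · intro x' row' h
        by_cases hx : x' = x
        · subst hx
          rw [PySem.Dict.get?_insert_self] at h
          exact (Option.some.injEq _ _ ▸ h).symm
        · rw [PySem.Dict.get?_insert_of_ne d (pvRowB x data) hx] at h
          exact hinv x' row' h

theorem computeDistanceNominal_alt_eq_map (data : List String) :
    computeDistanceNominal_alt data = data.map (fun x => pvRowB x data) := by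
  unfold computeDistanceNominal_alt
  rw [pvB_loop data data PySem.Dict.empty []
      (fun x row h => by simp [PySem.Dict.get?_empty] at h)]
  simp

-- ===== VERDICT (by name: the statement is the Claim_ definition above) =====
theorem computeDistanceNominal_spec : Claim_equal_computeDistanceNominal := by
  intro data _
  unfold Spec_computeDistanceNominal
  rw [computeDistanceNominal_eq_map, computeDistanceNominal_alt_eq_map]
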